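-- pv_equiv track=rewrite | github.com/mohamedOharoun/AP | exs/mochila_tabulation_restriccion_consecutivos/mochila_tab_rest.py | mochila_no_consecutiva
-- ===== SOURCE A (Python) =====
-- def mochila_no_consecutiva(values, weights, capacity):
--     n = len(values)
--     table = [[0] * (capacity + 1) for _ in range(n + 1)]
--
--     for i in range(1, n + 1):
--         for w in range(1, capacity + 1):
--             # No tomar el ítem i
--             curr_pos = table[i-1][w]
--
--             # Tomar el ítem i (saltando i-1)
--             around_pos = 0
--             if weights[i-1] <= w:
--                 if i >= 2:
--                     around_pos = table[i-2][w - weights[i-1]] + values[i-1]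
--                 else:
--                     around_pos = values[i-1]
--
--             table[i][w] = max(curr_pos, around_pos)
--
--     # Recuperar los ítems elegidos
--     elegidos = []
--     i, w = n, capacity
--     while i > 0:
--         if table[i][w] != table[i-1][w]:
--             elegidos.append(i)
--             w -= weights[i-1]
--             i -= 2  # saltar el consecutivo
--         else:
--             i -= 1
--
--     elegidos.reverse()
--     return table[n][capacity], elegidos
-- ===== SOURCE B (Python) =====
-- def mochila_no_consecutiva(values, weights, capacity):
--     # Forward DP over (value, chain) pairs: every cell carries the best value
--     # together with a persistent linked chain of the items achieving it, so the
--     # answer (value and chosen items) is read straight off the final cell and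
--     # no backtracking pass over a table is needed.
--     prevprev = [(0, None)] * (capacity + 1)
--     prev = [(0, None)] * (capacity + 1)
--     for i in range(1, len(values) + 1):
--         wt = weights[i - 1]
--         val = values[i - 1]
--         curr = [(0, None)]  # zero-capacity base cell
--         for w in range(1, capacity + 1):
--             best = prev[w]
--             if wt <= w:
--                 sub = prevprev[w - wt]
--                 cand = val + sub[0]
--                 if cand > best[0]:
--                     best = (cand, (sub[1], i))
--             curr.append(best)
--         prevprev, prev = prev, curr
--     total, chain = prev[capacity]
--     elegidos = []
--     while chain is not None:
--         chain, i = chain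
--         elegidos.append(i)
--     elegidos.reverse()
--     return total, elegidos
-- ===== Notes on version B (the rewrite author's own statement) =====
-- stated objective: alternative
-- what changed: A fills an integer DP table and then recovers the chosen items in a separate backtracking pass that re-compares adjacent table rows; B runs the DP over (value, solution) pairs in which every cell carries a persistent linked chain of the items achieving its value, so the answer and the chosen items are read directly off the final cell and the backtracking phase disappears.
-- outside the precondition, e.g. on mochila_no_consecutiva([5], [-1], 2): A returns (5, [1]), B raises IndexError; on mochila_no_consecutiva([3], [], 0): A returns (0, []), B raises IndexError
import Mathlib
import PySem

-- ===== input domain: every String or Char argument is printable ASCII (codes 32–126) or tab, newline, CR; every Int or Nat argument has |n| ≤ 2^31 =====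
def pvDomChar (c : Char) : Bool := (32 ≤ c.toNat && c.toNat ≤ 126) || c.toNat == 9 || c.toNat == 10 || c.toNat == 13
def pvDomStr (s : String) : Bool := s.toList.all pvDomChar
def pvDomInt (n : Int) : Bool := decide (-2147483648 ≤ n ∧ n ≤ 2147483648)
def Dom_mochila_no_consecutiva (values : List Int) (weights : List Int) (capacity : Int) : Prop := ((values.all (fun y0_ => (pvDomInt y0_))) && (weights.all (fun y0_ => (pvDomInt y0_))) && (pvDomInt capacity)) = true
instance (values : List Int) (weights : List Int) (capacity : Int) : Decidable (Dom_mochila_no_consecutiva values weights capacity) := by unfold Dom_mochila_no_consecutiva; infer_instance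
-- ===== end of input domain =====

-- B replaces A's integer table + separate backtracking pass by a DP over (value, chain) pairs:
-- every cell carries a persistent linked chain of the chosen items, so the answer is read
-- directly off the final cell (objective: alternative decomposition, same asymptotic cost).

-- ===== PORT A =====
-- xs[i] for the in-range indices the loops use (raising out-of-range indices lie outside Pre_)
def pvGD (xs : List Int) (i : Int) : Int := PySem.List.pyGetD xs i 0

-- table[i][w] (read only at in-range indices under Pre_)
def pvCell (table : List (List Int)) (i w : Int) : Int :=
  PySem.List.pyGetD (PySem.List.pyGetD table i []) w 0

-- table[i][w] = x (i, w are the loop indices, nonnegative and in range)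
def pvSet (table : List (List Int)) (i w : Int) (x : Int) : List (List Int) :=
  table.set i.toNat ((PySem.List.pyGetD table i []).set w.toNat x)

-- the body of A's inner `for w in range(1, capacity+1)` loop
def pvAInner (values weights : List Int) (i : Int) (table : List (List Int)) (w : Int) :
    List (List Int) :=
  let curr_pos := pvCell table (i-1) w
  let around_pos : Int :=
    if pvGD weights (i-1) ≤ w then
      (if 2 ≤ i then pvCell table (i-2) (w - pvGD weights (i-1)) + pvGD values (i-1)
       else pvGD values (i-1))
    else 0
  pvSet table i w (max curr_pos around_pos)

-- A's reconstruction while-loop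
def pvARec (weights : List Int) (table : List (List Int)) (i w : Int) (acc : List Int) :
    List Int :=
  if 0 < i then
    (if pvCell table i w ≠ pvCell table (i-1) w then
      pvARec weights table (i-2) (w - pvGD weights (i-1)) (acc ++ [i])
    else
      pvARec weights table (i-1) w acc)
  else acc
termination_by i.toNat
decreasing_by all_goals omega

def mochila_no_consecutiva (values : List Int) (weights : List Int) (capacity : Int) : Int × List Int :=
  let n : Int := (values.length : Int)
  let table : List (List Int) :=
    List.replicate (n+1).toNat (List.replicate (capacity+1).toNat (0 : Int))
  let table := (PySem.List.pyRange 1 (n+1) 1).foldl (fun table i =>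
    (PySem.List.pyRange 1 (capacity+1) 1).foldl (pvAInner values weights i) table) table
  (pvCell table n capacity, (pvARec weights table n capacity []).reverse)

-- ===== PORT B =====
-- Python's chain value: None, or a pair (sub_chain, i)
inductive PvChain : Type
  | nil : PvChain
  | cons : PvChain → Int → PvChain
deriving DecidableEq, Repr

-- prev[w] / prevprev[w-wt] (read only at in-range indices under Pre_)
def pvPGD (xs : List (Int × PvChain)) (i : Int) : Int × PvChain :=
  PySem.List.pyGetD xs i (0, PvChain.nil)

-- the body of B's inner `for w in range(1, capacity+1)` loop (the cell computed for column w)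
def pvBCell (prevprev prev : List (Int × PvChain)) (wt val i w : Int) : Int × PvChain :=
  let best := pvPGD prev w
  if wt ≤ w then
    let sub := pvPGD prevprev (w - wt)
    let cand := val + sub.1
    if best.1 < cand then (cand, PvChain.cons sub.2 i) else best
  else best

-- the body of B's `for i in range(1, n+1)` loop: state = (prevprev, prev)
def pvBStep (values weights : List Int) (capacity : Int)
    (s : List (Int × PvChain) × List (Int × PvChain)) (i : Int) :
    List (Int × PvChain) × List (Int × PvChain) :=
  let wt := pvGD weights (i-1)
  let val := pvGD values (i-1)
  let curr := (PySem.List.pyRange 1 (capacity+1) 1).foldl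
    (fun curr w => curr ++ [pvBCell s.1 s.2 wt val i w]) [((0 : Int), PvChain.nil)]
  (s.2, curr)

-- B's `while chain is not None` flattening loop
def pvFlatten : PvChain → List Int → List Int
  | PvChain.nil, acc => acc
  | PvChain.cons prev i, acc => pvFlatten prev (acc ++ [i])

def mochila_no_consecutiva_alt (values : List Int) (weights : List Int) (capacity : Int) : Int × List Int :=
  let init : List (Int × PvChain) := List.replicate (capacity+1).toNat ((0 : Int), PvChain.nil)
  let s := (PySem.List.pyRange 1 ((values.length : Int)+1) 1).foldl
    (pvBStep values weights capacity) (init, init)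
  let tc := pvPGD s.2 capacity
  (tc.1, (pvFlatten tc.2 []).reverse)

-- ===== PRECONDITION & SPEC =====
-- Pre_ excludes the inputs on which A raises IndexError (negative capacity; a negative weight
-- among the first len(values) ones when capacity ≥ 1, where A raises except when only the
-- first weight is negative), plus inputs A returns on but B's row indexing raises on
-- (weights shorter than values, or a lone negative first weight with capacity ≥ 1).
def Pre_mochila_no_consecutiva (values : List Int) (weights : List Int) (capacity : Int) : Prop :=
  0 ≤ capacity ∧ values.length ≤ weights.length ∧
    (capacity = 0 ∨ ∀ x ∈ weights.take values.length, 0 ≤ x)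
instance (values : List Int) (weights : List Int) (capacity : Int) : Decidable (Pre_mochila_no_consecutiva values weights capacity) := by unfold Pre_mochila_no_consecutiva; infer_instance

def pvWitness_mochila_no_consecutiva : List Int × List Int × Int := ([3, 4, 5], [1, 2, 3], 4)

def Spec_mochila_no_consecutiva (values : List Int) (weights : List Int) (capacity : Int) (out : Int × List Int) : Prop := out = mochila_no_consecutiva_alt values weights capacity
instance (values : List Int) (weights : List Int) (capacity : Int) (out : Int × List Int) : Decidable (Spec_mochila_no_consecutiva values weights capacity out) := by unfold Spec_mochila_no_consecutiva; infer_instance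

-- ===== CLAIM (what is proved, stated in full; the proofs are below) =====
def Claim_equal_mochila_no_consecutiva : Prop := ∀ (values : List Int) (weights : List Int) (capacity : Int), Dom_mochila_no_consecutiva values weights capacity → Pre_mochila_no_consecutiva values weights capacity → Spec_mochila_no_consecutiva values weights capacity (mochila_no_consecutiva values weights capacity)

-- ===== LEMMAS AND PROOFS =====

-- the common DP recurrence both programs compute (value part)
def pvR (values weights : List Int) : Nat → Nat → Int
  | 0, _ => 0
  | _+1, 0 => 0
  | (i+1), (w+1) =>
      let wt := weights.getD i 0
      let v := values.getD i 0
      let around : Int :=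
        if wt ≤ ((w : Int)+1) then
          (if 1 ≤ i then pvR values weights (i-1) (((w : Int)+1 - wt).toNat) + v else v)
        else 0
      max (pvR values weights i (w+1)) around
termination_by i _ => i
decreasing_by all_goals omega

theorem pvR_zero_left (values weights : List Int) (k : Nat) : pvR values weights 0 k = 0 := by
  simp [pvR]

theorem pvR_zero_right (values weights : List Int) (j : Nat) : pvR values weights j 0 = 0 := by
  cases j <;> simp [pvR]

theorem pvR_succ (values weights : List Int) (j k : Nat) :
    pvR values weights (j+1) (k+1) =
      max (pvR values weights j (k+1))
        (if weights.getD j 0 ≤ ((k : Int)+1) then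
          (if 1 ≤ j then pvR values weights (j-1) (((k : Int)+1 - weights.getD j 0).toNat) + values.getD j 0
           else values.getD j 0)
         else 0) := by
  rw [pvR]

theorem pvR_nonneg (values weights : List Int) (j k : Nat) : 0 ≤ pvR values weights j k := by
  induction j generalizing k with
  | zero => simp [pvR_zero_left]
  | succ j ih =>
    cases k with
    | zero => simp [pvR_zero_right]
    | succ k => rw [pvR_succ]; exact le_trans (ih (k+1)) (le_max_left _ _)

-- uniform form of the step (the i=1 special case collapses, pvR (0-1) = pvR 0 = 0)
theorem pvR_succ' (values weights : List Int) (j k : Nat) :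
    pvR values weights (j+1) (k+1) =
      max (pvR values weights j (k+1))
        (if weights.getD j 0 ≤ ((k : Int)+1) then
          values.getD j 0 + pvR values weights (j-1) (((k : Int)+1 - weights.getD j 0).toNat)
         else 0) := by
  rw [pvR_succ]
  by_cases hj : 1 ≤ j
  · simp only [hj, if_true]; ring_nf
  · have : j = 0 := by omega
    subst this
    simp [pvR_zero_left]

theorem pvGetD_map_range {α : Type} (f : Nat → α) (d : α) (n : Nat) (i : Int)
    (h0 : 0 ≤ i) (h : i.toNat < n) :
    PySem.List.pyGetD ((List.range n).map f) i d = f i.toNat := by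
  rw [PySem.List.pyGetD_eq_getElem _ _ h0 (by simpa using (by exact_mod_cast (by omega : (i : Int) < (n:Int))))]
  · simp

def pvRowR (values weights : List Int) (C j : Nat) : List Int :=
  (List.range (C+1)).map (fun k => pvR values weights j k)

def pvZeros (C : Nat) : List Int := List.replicate (C+1) (0 : Int)

theorem pvRowR_zero (values weights : List Int) (C : Nat) :
    pvRowR values weights C 0 = pvZeros C := by
  apply List.ext_getElem <;> simp [pvRowR, pvZeros, pvR_zero_left]

theorem pvRowR_get (values weights : List Int) (C j : Nat) (i : Int)
    (h0 : 0 ≤ i) (h : i ≤ (C : Int)) :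
    pvGD (pvRowR values weights C j) i = pvR values weights j i.toNat := by
  unfold pvGD pvRowR
  rw [pvGetD_map_range _ _ _ _ h0 (by omega)]

theorem pvSet_map_range {α : Type} (f : Nat → α) (n k : Nat) (x : α) :
    ((List.range n).map f).set k x = (List.range n).map (fun t => if t = k then x else f t) := by
  apply List.ext_getElem
  · simp
  · intro t ht1 ht2
    simp only [List.length_set, List.length_map, List.length_range] at ht1
    rw [List.getElem_set]
    by_cases h : k = t
    · subst h; simp
    · simp [h]; intro h'; exact absurd h'.symm h

theorem pvGD_natCast (xs : List Int) (n : Nat) : pvGD xs (n : Int) = xs.getD n 0 := by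
  simp [pvGD]

theorem pvCore (values weights : List Int) (C N : Nat)
    (hnn : 1 ≤ C → ∀ t, t < N → 0 ≤ weights.getD t 0)
    (J k' : Nat) (hJ : J < N) (hk : k'+1 ≤ C) :
    (weights.getD J 0 ≤ ((k' : Int)+1) →
       pvGD (pvRowR values weights C (J-1)) (((k' : Int)+1) - weights.getD J 0)
         = pvR values weights (J-1) ((((k' : Int)+1) - weights.getD J 0).toNat))
    ∧ pvR values weights (J+1) (k'+1)
        = max (pvR values weights J (k'+1))
            (if weights.getD J 0 ≤ ((k' : Int)+1) then
               values.getD J 0 + pvR values weights (J-1) ((((k' : Int)+1) - weights.getD J 0).toNat)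
             else 0) := by
  have hwt : 0 ≤ weights.getD J 0 := hnn (by omega) J hJ
  constructor
  · intro hle
    exact pvRowR_get values weights C (J-1) _ (by omega) (by omega)
  · exact pvR_succ' values weights J k'

def pvPartial (values weights : List Int) (C j m : Nat) : List Int :=
  (List.range (C+1)).map (fun k => if 1 ≤ k ∧ k ≤ m then pvR values weights j k else 0)

def pvTbl (values weights : List Int) (C N j : Nat) : List (List Int) :=
  (List.range (N+1)).map (fun r => if r ≤ j then pvRowR values weights C r else pvZeros C)

def pvTblP (values weights : List Int) (C N j m : Nat) : List (List Int) :=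
  (List.range (N+1)).map (fun r =>
    if r ≤ j then pvRowR values weights C r
    else if r = j+1 then pvPartial values weights C (j+1) m else pvZeros C)

theorem pvTbl_init (values weights : List Int) (C N : Nat) :
    List.replicate (N+1) (List.replicate (C+1) (0:Int)) = pvTbl values weights C N 0 := by
  apply List.ext_getElem
  · simp [pvTbl]
  · intro r h1 h2
    simp only [pvTbl, List.getElem_replicate, List.getElem_map, List.getElem_range]
    simp only [List.length_replicate] at h1
    by_cases hr : r ≤ 0
    · have : r = 0 := by omega
      subst this
      rw [if_pos (le_refl 0), pvRowR_zero]
      rfl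
    · rw [if_neg hr]; rfl

theorem pvTblP_zero (values weights : List Int) (C N j : Nat) :
    pvTblP values weights C N j 0 = pvTbl values weights C N j := by
  unfold pvTblP pvTbl
  apply List.map_congr_left
  intro r _
  by_cases hr : r ≤ j
  · simp [hr]
  · rw [if_neg hr, if_neg hr]
    by_cases hr2 : r = j+1
    · rw [if_pos hr2]
      apply List.ext_getElem <;> simp [pvPartial, pvZeros]
      omega
    · rw [if_neg hr2]

theorem pvTblP_last (values weights : List Int) (C N j : Nat) :
    pvTblP values weights C N j C = pvTbl values weights C N (j+1) := by
  unfold pvTblP pvTbl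
  apply List.map_congr_left
  intro r _
  by_cases hr : r ≤ j
  · rw [if_pos hr, if_pos (by omega)]
  · rw [if_neg hr]
    by_cases hr2 : r = j+1
    · rw [if_pos hr2, if_pos (by omega), hr2]
      apply List.ext_getElem
      · simp [pvPartial, pvRowR]
      · intro k h1 h2
        simp only [pvPartial, pvRowR, List.getElem_map, List.getElem_range]
        simp only [pvPartial, List.length_map, List.length_range] at h1
        by_cases hk : 1 ≤ k ∧ k ≤ C
        · rw [if_pos hk]
        · rw [if_neg hk]
          have : k = 0 := by omega
          subst this
          rw [pvR_zero_right]
    · rw [if_neg hr2, if_neg (by omega)]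

theorem pvTblP_cell (values weights : List Int) (C N j m : Nat) (r k : Int)
    (hr0 : 0 ≤ r) (hrj : r.toNat ≤ j) (hjN : j ≤ N) (hk0 : 0 ≤ k) (hkC : k ≤ (C : Int)) :
    pvCell (pvTblP values weights C N j m) r k = pvR values weights r.toNat k.toNat := by
  unfold pvCell pvTblP
  rw [pvGetD_map_range _ _ _ _ hr0 (by omega), if_pos hrj]
  exact pvRowR_get values weights C _ k hk0 hkC

theorem pvTbl_cell (values weights : List Int) (C N j : Nat) (r k : Int)
    (hr0 : 0 ≤ r) (hrj : r.toNat ≤ j) (hjN : j ≤ N) (hk0 : 0 ≤ k) (hkC : k ≤ (C : Int)) :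
    pvCell (pvTbl values weights C N j) r k = pvR values weights r.toNat k.toNat := by
  unfold pvCell pvTbl
  rw [pvGetD_map_range _ _ _ _ hr0 (by omega), if_pos hrj]
  exact pvRowR_get values weights C _ k hk0 hkC

theorem pvSet_step (values weights : List Int) (C N j m : Nat) (hj : j+1 ≤ N) :
    pvSet (pvTblP values weights C N j m) (((j+1 : Nat)) : Int) (((m+1 : Nat)) : Int)
        (pvR values weights (j+1) (m+1))
      = pvTblP values weights C N j (m+1) := by
  unfold pvSet
  have hrow : PySem.List.pyGetD (pvTblP values weights C N j m) ((j+1 : Nat) : Int) [] =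
      pvPartial values weights C (j+1) m := by
    unfold pvTblP
    rw [pvGetD_map_range _ _ _ _ (by omega) (by simp; omega)]
    simp only [Int.toNat_natCast]
    rw [if_neg (by omega)]
    simp
  rw [hrow]
  have hnewrow : (pvPartial values weights C (j+1) m).set ((m+1 : Nat) : Int).toNat
      (pvR values weights (j+1) (m+1)) = pvPartial values weights C (j+1) (m+1) := by
    simp only [Int.toNat_natCast]
    unfold pvPartial
    rw [pvSet_map_range]
    apply List.map_congr_left
    intro t ht
    by_cases h : t = m+1
    · subst h
      rw [if_pos rfl, if_pos (by omega)]
    · rw [if_neg h]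
      by_cases h2 : 1 ≤ t ∧ t ≤ m
      · rw [if_pos h2, if_pos (by omega)]
      · rw [if_neg h2, if_neg (by omega)]
  rw [hnewrow]
  simp only [Int.toNat_natCast]
  unfold pvTblP
  rw [pvSet_map_range]
  apply List.map_congr_left
  intro r _
  by_cases h : r = j+1
  · subst h
    rw [if_pos rfl, if_neg (by omega)]
    simp
  · rw [if_neg h]
    by_cases h2 : r ≤ j
    · rw [if_pos h2, if_pos h2]
    · rw [if_neg h2, if_neg h2, if_neg h, if_neg h]

theorem pvAInner_eval (values weights : List Int) (C N : Nat)
    (hnn : 1 ≤ C → ∀ t, t < N → 0 ≤ weights.getD t 0) (j m : Nat)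
    (hj : j < N) (hm : m+1 ≤ C) :
    pvAInner values weights ((j+1 : Nat) : Int) (pvTblP values weights C N j m)
        ((m+1 : Nat) : Int)
      = pvTblP values weights C N j (m+1) := by
  simp only [pvAInner]
  have hi1 : ((j+1 : Nat) : Int) - 1 = ((j : Nat) : Int) := by push_cast; ring
  rw [hi1, pvGD_natCast, pvGD_natCast]
  have hcell1 : pvCell (pvTblP values weights C N j m) ((j : Nat) : Int) ((m+1 : Nat) : Int)
      = pvR values weights j (m+1) := by
    rw [pvTblP_cell values weights C N j m _ _ (by omega) (by omega) (by omega) (by omega)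
      (by omega)]
    simp
  rw [hcell1]
  have hcore := pvCore values weights C N hnn j m hj hm
  have hceq : ((m+1 : Nat) : Int) = (m : Int) + 1 := by push_cast; ring
  have haround :
      (if weights.getD j 0 ≤ ((m+1 : Nat) : Int) then
        (if 2 ≤ ((j+1 : Nat) : Int) then
          pvCell (pvTblP values weights C N j m) (((j+1 : Nat) : Int)-2)
              (((m+1 : Nat) : Int) - weights.getD j 0) + values.getD j 0
         else values.getD j 0)
       else 0)
      = (if weights.getD j 0 ≤ ((m : Int)+1) then
          values.getD j 0 + pvR values weights (j-1) ((((m : Int)+1) - weights.getD j 0).toNat)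
         else 0) := by
    rw [hceq]
    by_cases hle : weights.getD j 0 ≤ ((m : Int)+1)
    · rw [if_pos hle, if_pos hle]
      have hwt : 0 ≤ weights.getD j 0 := hnn (by omega) j hj
      by_cases hj1 : 1 ≤ j
      · rw [if_pos (by omega)]
        have hi2 : ((j+1 : Nat) : Int) - 2 = ((j-1 : Nat) : Int) := by omega
        rw [hi2]
        rw [pvTblP_cell values weights C N j m _ _ (by omega) (by omega) (by omega)
          (by omega) (by omega)]
        simp only [Int.toNat_natCast]
        ring
      · have hj0 : j = 0 := by omega
        subst hj0
        rw [if_neg (by norm_num)]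
        simp [pvR_zero_left]
    · rw [if_neg hle, if_neg hle]
  rw [haround, ← hcore.2]
  exact pvSet_step values weights C N j m (by omega)

theorem pvA_inner_aux (values weights : List Int) (C N : Nat)
    (hnn : 1 ≤ C → ∀ t, t < N → 0 ≤ weights.getD t 0) (j : Nat) (hj : j < N) :
    ∀ m, m ≤ C →
      (PySem.List.pyRange 1 ((m : Int)+1) 1).foldl
          (pvAInner values weights ((j+1 : Nat) : Int)) (pvTbl values weights C N j)
        = pvTblP values weights C N j m := by
  intro m
  induction m with
  | zero =>
    intro _
    rw [show ((0 : Nat) : Int) + 1 = 1 from by ring,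
      PySem.List.pyRange_one_eq_nil (le_refl 1)]
    simp only [List.foldl_nil]
    exact (pvTblP_zero values weights C N j).symm
  | succ m ih =>
    intro hm
    have hcast : ((m+1 : Nat) : Int) + 1 = ((m : Int) + 1) + 1 := by push_cast; ring
    rw [hcast, PySem.List.pyRange_one_succ_right (by omega), List.foldl_append, ih (by omega)]
    simp only [List.foldl_cons, List.foldl_nil]
    have hw : (m : Int) + 1 = ((m+1 : Nat) : Int) := by push_cast; ring
    rw [hw]
    exact pvAInner_eval values weights C N hnn j m hj hm

theorem pvA_fill (values weights : List Int) (C N : Nat)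
    (hnn : 1 ≤ C → ∀ t, t < N → 0 ≤ weights.getD t 0) :
    ∀ J, J ≤ N →
      (PySem.List.pyRange 1 ((J : Int)+1) 1).foldl
          (fun table i =>
            (PySem.List.pyRange 1 ((C : Int)+1) 1).foldl (pvAInner values weights i) table)
          (pvTbl values weights C N 0)
        = pvTbl values weights C N J := by
  intro J
  induction J with
  | zero =>
    intro _
    rw [show ((0 : Nat) : Int) + 1 = 1 from by ring,
      PySem.List.pyRange_one_eq_nil (le_refl 1)]
    simp
  | succ J ih =>
    intro hJ
    have hcast : ((J+1 : Nat) : Int) + 1 = ((J : Int) + 1) + 1 := by push_cast; ring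
    rw [hcast, PySem.List.pyRange_one_succ_right (a := 1) (b := (J : Int) + 1) (by omega),
      List.foldl_append, ih (by omega)]
    simp only [List.foldl_cons, List.foldl_nil]
    have hi : (J : Int) + 1 = ((J+1 : Nat) : Int) := by push_cast; ring
    rw [hi, pvA_inner_aux values weights C N hnn J (by omega) C (le_refl C)]
    exact pvTblP_last values weights C N J

-- ===== B-side lemmas: the (value, chain) recurrence =====
def pvPair (values weights : List Int) : Nat → Nat → Int × PvChain
  | 0, _ => (0, PvChain.nil)
  | _+1, 0 => (0, PvChain.nil)
  | (j+1), (k+1) =>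
      let wt := weights.getD j 0
      let best := pvPair values weights j (k+1)
      if wt ≤ ((k : Int)+1) then
        let sub := pvPair values weights (j-1) ((((k : Int)+1) - wt).toNat)
        let cand := values.getD j 0 + sub.1
        if best.1 < cand then (cand, PvChain.cons sub.2 ((j : Int)+1)) else best
      else best
termination_by j _ => j
decreasing_by all_goals omega

theorem pvPair_zero_left (values weights : List Int) (k : Nat) :
    pvPair values weights 0 k = (0, PvChain.nil) := by
  cases k <;> simp [pvPair]

theorem pvPair_zero_right (values weights : List Int) (j : Nat) :
    pvPair values weights j 0 = (0, PvChain.nil) := by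
  cases j <;> simp [pvPair]

theorem pvPair_succ (values weights : List Int) (j k : Nat) :
    pvPair values weights (j+1) (k+1) =
      (if weights.getD j 0 ≤ ((k : Int)+1) then
        (if (pvPair values weights j (k+1)).1 <
            values.getD j 0 + (pvPair values weights (j-1) ((((k : Int)+1) - weights.getD j 0).toNat)).1 then
          (values.getD j 0 + (pvPair values weights (j-1) ((((k : Int)+1) - weights.getD j 0).toNat)).1,
            PvChain.cons (pvPair values weights (j-1) ((((k : Int)+1) - weights.getD j 0).toNat)).2 ((j : Int)+1))
         else pvPair values weights j (k+1))
       else pvPair values weights j (k+1)) := by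
  rw [pvPair]

theorem pvPair_fst (values weights : List Int) (j k : Nat) :
    (pvPair values weights j k).1 = pvR values weights j k := by
  induction j using Nat.strong_induction_on generalizing k with
  | _ j ihs =>
  match j with
  | 0 => rw [pvPair_zero_left, pvR_zero_left]
  | j+1 =>
    have ih : ∀ k, (pvPair values weights j k).1 = pvR values weights j k :=
      fun k => ihs j (by omega) k
    cases k with
    | zero => rw [pvPair_zero_right, pvR_zero_right]
    | succ k =>
      rw [pvPair_succ, pvR_succ']
      have ih1 : (pvPair values weights j (k+1)).1 = pvR values weights j (k+1) := ih (k+1)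
      have ih2 : (pvPair values weights (j-1) ((((k : Int)+1) - weights.getD j 0).toNat)).1
          = pvR values weights (j-1) ((((k : Int)+1) - weights.getD j 0).toNat) :=
        ihs (j-1) (by omega) _
      rw [← ih1, ← ih2]
      by_cases hg : weights.getD j 0 ≤ ((k : Int)+1)
      · rw [if_pos hg, if_pos hg]
        by_cases hlt : (pvPair values weights j (k+1)).1 <
            values.getD j 0 + (pvPair values weights (j-1) ((((k : Int)+1) - weights.getD j 0).toNat)).1
        · rw [if_pos hlt]
          exact (max_eq_right (le_of_lt hlt)).symm
        · rw [if_neg hlt]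
          exact (max_eq_left (not_lt.mp hlt)).symm
      · rw [if_neg hg, if_neg hg]
        have h0 : (0 : Int) ≤ (pvPair values weights j (k+1)).1 := by
          rw [ih1]; exact pvR_nonneg _ _ _ _
        exact (max_eq_left h0).symm

def pvPRow (values weights : List Int) (C j : Nat) : List (Int × PvChain) :=
  (List.range (C+1)).map (fun k => pvPair values weights j k)

theorem pvPRow_zero (values weights : List Int) (C : Nat) :
    pvPRow values weights C 0 = List.replicate (C+1) ((0 : Int), PvChain.nil) := by
  apply List.ext_getElem <;> simp [pvPRow, pvPair_zero_left]

theorem pvPRow_get (values weights : List Int) (C j : Nat) (i : Int)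
    (h0 : 0 ≤ i) (h : i ≤ (C : Int)) :
    pvPGD (pvPRow values weights C j) i = pvPair values weights j i.toNat := by
  unfold pvPGD pvPRow
  rw [pvGetD_map_range _ _ _ _ h0 (by omega)]

theorem pvFoldAppend {α β : Type} (g : β → α) (l : List β) (acc : List α) :
    l.foldl (fun a w => a ++ [g w]) acc = acc ++ l.map g := by
  induction l generalizing acc with
  | nil => simp
  | cons x xs ih => simp [ih]

theorem pvBRow_eval (values weights : List Int) (C N : Nat)
    (hnn : 1 ≤ C → ∀ t, t < N → 0 ≤ weights.getD t 0) (J : Nat) (hJ : J < N) :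
    (PySem.List.pyRange 1 ((C : Int)+1) 1).foldl
        (fun curr w => curr ++ [pvBCell (pvPRow values weights C (J-1))
          (pvPRow values weights C J) (pvGD weights (((J+1 : Nat) : Int)-1))
          (pvGD values (((J+1 : Nat) : Int)-1)) ((J+1 : Nat) : Int) w])
        [((0 : Int), PvChain.nil)]
      = pvPRow values weights C (J+1) := by
  rw [pvFoldAppend]
  apply List.ext_getElem
  · simp [pvPRow, PySem.List.length_pyRange_one]
  · intro t h1 h2
    simp only [pvPRow, List.length_map, List.length_range] at h2
    cases t with
    | zero =>
      simp only [List.getElem_append_left (by simp : 0 < [((0 : Int), PvChain.nil)].length)]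
      simp [pvPRow, pvPair_zero_right]
    | succ k =>
      have hk : k < C := by
        simp only [List.length_append, List.length_map, List.length_cons, List.length_nil,
          PySem.List.length_pyRange_one] at h1
        omega
      rw [List.getElem_append_right (by simp : [((0 : Int), PvChain.nil)].length ≤ k+1)]
      simp only [List.length_cons, List.length_nil, List.getElem_map,
        PySem.List.getElem_pyRange_one, Nat.add_sub_cancel]
      have hrhs : ∀ (h : k+1 < (pvPRow values weights C (J+1)).length),
          (pvPRow values weights C (J+1))[k+1]'h = pvPair values weights (J+1) (k+1) := by
        intro h; simp [pvPRow]
      rw [hrhs]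
      have hcast1 : ((J+1 : Nat) : Int) - 1 = ((J : Nat) : Int) := by push_cast; ring
      have hwe : (1 : Int) + (k : Int) = ((k : Int) + 1) := by ring
      rw [hwe, pvBCell, hcast1, pvGD_natCast, pvGD_natCast]
      have hbest : pvPGD (pvPRow values weights C J) ((k : Int)+1)
          = pvPair values weights J (k+1) := by
        rw [pvPRow_get values weights C J _ (by omega) (by omega)]
        norm_num
      rw [hbest, pvPair_succ]
      by_cases hg : weights.getD J 0 ≤ ((k : Int)+1)
      · rw [if_pos hg, if_pos hg]
        have hwt : 0 ≤ weights.getD J 0 := hnn (by omega) J hJ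
        have hsub : pvPGD (pvPRow values weights C (J-1)) (((k : Int)+1) - weights.getD J 0)
            = pvPair values weights (J-1) ((((k : Int)+1) - weights.getD J 0).toNat) := by
          rw [pvPRow_get values weights C (J-1) _ (by omega) (by omega)]
        rw [hsub]
        rw [pvPair_fst]
        have hi : ((J+1 : Nat) : Int) = ((J : Nat) : Int) + 1 := by push_cast; ring
        rw [hi, pvPair_fst]
        simp [pvPair_fst]
      · rw [if_neg hg, if_neg hg]

theorem pvB_fill (values weights : List Int) (C N : Nat)
    (hnn : 1 ≤ C → ∀ t, t < N → 0 ≤ weights.getD t 0) :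
    ∀ J, J ≤ N →
      (PySem.List.pyRange 1 ((J : Int)+1) 1).foldl
          (pvBStep values weights ((C : Int)))
          (List.replicate (C+1) ((0 : Int), PvChain.nil),
           List.replicate (C+1) ((0 : Int), PvChain.nil))
        = (pvPRow values weights C (J-1), pvPRow values weights C J) := by
  intro J
  induction J with
  | zero =>
    intro _
    rw [show ((0 : Nat) : Int) + 1 = 1 from by ring,
      PySem.List.pyRange_one_eq_nil (le_refl 1)]
    simp [pvPRow_zero]
  | succ J ih =>
    intro hJ
    have hcast : ((J+1 : Nat) : Int) + 1 = ((J : Int) + 1) + 1 := by push_cast; ring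
    rw [hcast, PySem.List.pyRange_one_succ_right (a := 1) (b := (J : Int) + 1) (by omega),
      List.foldl_append, ih (by omega)]
    simp only [List.foldl_cons, List.foldl_nil]
    have hi : (J : Int) + 1 = ((J+1 : Nat) : Int) := by push_cast; ring
    rw [hi]
    unfold pvBStep
    simp only []
    rw [pvBRow_eval values weights C N hnn J (by omega)]
    simp

-- A's backtracking over the table produces exactly the flattening of B's chain
theorem pvRec_eq (values weights : List Int) (C N : Nat)
    (hnn : 1 ≤ C → ∀ t, t < N → 0 ≤ weights.getD t 0) :
    ∀ fuel (i w : Int) (acc : List Int), i.toNat ≤ fuel → i ≤ (N : Int) →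
      0 ≤ w → w ≤ (C : Int) →
      pvARec weights (pvTbl values weights C N N) i w acc
        = pvFlatten (pvPair values weights i.toNat w.toNat).2 acc := by
  intro fuel
  induction fuel with
  | zero =>
    intro i w acc hf hiN hw0 hwC
    rw [pvARec, if_neg (by omega)]
    have hz : i.toNat = 0 := by omega
    simp [hz, pvPair_zero_left, pvFlatten]
  | succ fuel ih =>
    intro i w acc hf hiN hw0 hwC
    by_cases hi : 0 < i
    · rw [pvARec, if_pos hi]
      have hcellA : pvCell (pvTbl values weights C N N) i w
          = pvR values weights i.toNat w.toNat := by
        have hij : i = ((i.toNat : Nat) : Int) := by omega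
        have hwk : w = ((w.toNat : Nat) : Int) := by omega
        rw [hij, hwk]
        rw [pvTbl_cell values weights C N N _ _ (by omega) (by omega) (le_refl N)
          (by omega) (by omega)]
      have hcellA' : pvCell (pvTbl values weights C N N) (i-1) w
          = pvR values weights (i.toNat - 1) w.toNat := by
        have hij : i - 1 = (((i.toNat - 1 : Nat)) : Int) := by omega
        have hwk : w = ((w.toNat : Nat) : Int) := by omega
        rw [hij, hwk]
        rw [pvTbl_cell values weights C N N _ _ (by omega) (by omega) (le_refl N)
          (by omega) (by omega)]
        simp
      simp only [hcellA, hcellA']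
      have hgw : pvGD weights (i-1) = weights.getD (i.toNat - 1) 0 := by
        have hij : i - 1 = (((i.toNat - 1 : Nat)) : Int) := by omega
        rw [hij, pvGD_natCast]
      cases hk : w.toNat with
      | zero =>
        rw [if_neg (by simp [pvR_zero_right])]
        rw [ih (i-1) w acc (by omega) (by omega) hw0 hwC]
        have e1 : (i-1).toNat = i.toNat - 1 := by omega
        rw [e1, hk]
        simp [pvPair_zero_right]
      | succ k =>
        obtain ⟨j, hij⟩ : ∃ j, i.toNat = j+1 := ⟨i.toNat - 1, by omega⟩
        have hwe : w = ((k : Int) + 1) := by omega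
        have hC1 : 1 ≤ C := by omega
        have hjN : j < N := by omega
        have e1 : i.toNat - 1 = j := by omega
        rw [hij]
        simp only [Nat.add_sub_cancel]
        have hstep := pvR_succ' values weights j k
        by_cases hTake : weights.getD j 0 ≤ ((k : Int)+1) ∧
            pvR values weights j (k+1) <
              values.getD j 0 + pvR values weights (j-1) ((((k : Int)+1) - weights.getD j 0).toNat)
        · have hne : pvR values weights (j+1) (k+1) ≠ pvR values weights j (k+1) := by
            rw [hstep, if_pos hTake.1]
            have := hTake.2
            omega
          rw [if_pos hne]
          have hwt : 0 ≤ weights.getD j 0 := hnn hC1 j hjN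
          rw [hgw, e1]
          have hrec := ih (i-2) (w - weights.getD j 0) (acc ++ [i]) (by omega) (by omega)
            (by omega) (by omega)
          rw [hrec]
          have e2 : (i-2).toNat = j - 1 := by omega
          have e3 : (w - weights.getD j 0).toNat = (((k : Int)+1) - weights.getD j 0).toNat := by
            omega
          rw [e2, e3]
          rw [pvPair_succ, if_pos hTake.1]
          rw [if_pos (by rw [pvPair_fst, pvPair_fst]; exact hTake.2)]
          have e4 : i = ((j : Int)+1) := by omega
          rw [e4]
          rfl
        · have hne : ¬ (pvR values weights (j+1) (k+1) ≠ pvR values weights j (k+1)) := by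
            simp only [ne_eq, not_not]
            rw [hstep]
            by_cases hg : weights.getD j 0 ≤ ((k : Int)+1)
            · rw [if_pos hg]
              have hle : values.getD j 0 +
                  pvR values weights (j-1) ((((k : Int)+1) - weights.getD j 0).toNat)
                    ≤ pvR values weights j (k+1) := by
                by_contra hlt
                exact hTake ⟨hg, by omega⟩
              exact max_eq_left hle
            · rw [if_neg hg]
              exact max_eq_left (pvR_nonneg _ _ _ _)
          rw [if_neg hne]
          rw [ih (i-1) w acc (by omega) (by omega) hw0 hwC]
          rw [show (i-1).toNat = j from by omega, hk]
          have hpp : pvPair values weights (j+1) (k+1) = pvPair values weights j (k+1) := by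
            rw [pvPair_succ]
            by_cases hg : weights.getD j 0 ≤ ((k : Int)+1)
            · rw [if_pos hg]
              rw [if_neg (by
                rw [pvPair_fst, pvPair_fst]
                intro hlt
                exact hTake ⟨hg, hlt⟩)]
            · rw [if_neg hg]
          rw [hpp]
    · rw [pvARec, if_neg hi]
      have hz : i.toNat = 0 := by omega
      simp [hz, pvPair_zero_left, pvFlatten]

-- ===== VERDICT (by name: the statement is the Claim_ definition above) =====
theorem mochila_no_consecutiva_spec : Claim_equal_mochila_no_consecutiva := by
  intro values weights capacity hdom hpre
  unfold Spec_mochila_no_consecutiva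
  obtain ⟨hc, hlen, hW⟩ := hpre
  have hC : capacity = ((capacity.toNat : Nat) : Int) := by omega
  have hnn : 1 ≤ capacity.toNat → ∀ t, t < values.length → 0 ≤ weights.getD t 0 := by
    intro h1 t ht
    rcases hW with h0 | hpos
    · omega
    · have htl : t < weights.length := by omega
      rw [List.getD_eq_getElem _ _ htl]
      apply hpos
      have hg : weights[t] = (weights.take values.length)[t]'(by
          rw [List.length_take]; omega) := by
        rw [List.getElem_take]
      rw [hg]
      exact List.getElem_mem _
  simp only [mochila_no_consecutiva, mochila_no_consecutiva_alt]
  rw [hC]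
  have h1 : (((values.length : Nat) : Int) + 1).toNat = values.length + 1 := by omega
  have h2 : (((capacity.toNat : Nat) : Int) + 1).toNat = capacity.toNat + 1 := by omega
  rw [h1, h2]
  rw [pvTbl_init values weights capacity.toNat values.length]
  rw [pvA_fill values weights capacity.toNat values.length hnn values.length (le_refl _)]
  rw [pvB_fill values weights capacity.toNat values.length hnn values.length (le_refl _)]
  refine Prod.ext ?_ ?_
  · show pvCell (pvTbl values weights capacity.toNat values.length values.length) _ _
      = (pvPGD (pvPRow values weights capacity.toNat values.length) _).1
    rw [pvTbl_cell values weights capacity.toNat values.length values.length _ _ (by omega)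
      (by omega) (le_refl _) (by omega) (by omega)]
    rw [pvPRow_get values weights capacity.toNat values.length _ (by omega) (by omega)]
    rw [pvPair_fst]
    simp
  · show (pvARec weights (pvTbl values weights capacity.toNat values.length values.length) _ _ []).reverse
      = (pvFlatten (pvPGD (pvPRow values weights capacity.toNat values.length) _).2 []).reverse
    rw [pvPRow_get values weights capacity.toNat values.length _ (by omega) (by omega)]
    refine congrArg List.reverse ?_
    exact pvRec_eq values weights capacity.toNat values.length hnn values.length.succ _ _ []
      (by omega) (by omega) (by omega) (by omega)
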